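-- pv_equiv track=rewrite | github.com/salaschen/ACM | Leetcode/75_SortColors/sol.py | sortFromLeft
-- ===== SOURCE A (Python) =====
-- def sortFromLeft(nums: [int], start, target) -> int:
--     result = None
--     if start is None:
--         return None
--     for i in range(start, len(nums)):
--         cur = nums[i]
--         if cur != target:
--             # now find the next 0
--             found = None
--             for j in range(i+1, len(nums)):
--                 if nums[j] == target:
--                     found = j
--                     break
--             # all the 0s are in the right place
--             if found is None:
--                 result = i
--                 break
--             # do the swap
--             else:
--                 nums[i], nums[found] = nums[found], nums[i]
--     return result
-- ===== SOURCE B (Python) =====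
-- # Closed form: A's loop moves every `target` from nums[start:] to the front of that
-- # suffix and stops at the first slot no target can fill, i.e. index
-- # len(nums) - (# non-target elements in nums[start:]), or None if the suffix is all targets.
-- # Return value only: unlike A, B does not mutate nums.
-- def sortFromLeft(nums, start, target):
--     if start is None:
--         return None
--     n = len(nums)
--     if start >= n:
--         return None
--     miss = sum(1 for x in nums[start:] if x != target)
--     return n - miss if miss else None
-- ===== Notes on version B (the rewrite author's own statement) =====
-- stated objective: simpler
-- what changed: A repeatedly scans the rest of the list for the next target and swaps it into place (worst-case quadratic); B computes the answer in one pass as a closed form: len(nums) minus the number of non-target elements in nums[start:], or None if that suffix is all targets.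
-- outside the precondition, e.g. on sortFromLeft([0], -1, 1): A returns -1, B returns 0; on sortFromLeft([], -1, 0): A raises IndexError, B returns None
-- crash fix: On start = some s with s < -len(nums), A raises IndexError (negative index past the front) while B returns its closed form computed on Python's clamped slice nums[s:] (None on the witness). — e.g. on sortFromLeft([], some (-1), 0): A raises IndexError, B returns none
import Mathlib
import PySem

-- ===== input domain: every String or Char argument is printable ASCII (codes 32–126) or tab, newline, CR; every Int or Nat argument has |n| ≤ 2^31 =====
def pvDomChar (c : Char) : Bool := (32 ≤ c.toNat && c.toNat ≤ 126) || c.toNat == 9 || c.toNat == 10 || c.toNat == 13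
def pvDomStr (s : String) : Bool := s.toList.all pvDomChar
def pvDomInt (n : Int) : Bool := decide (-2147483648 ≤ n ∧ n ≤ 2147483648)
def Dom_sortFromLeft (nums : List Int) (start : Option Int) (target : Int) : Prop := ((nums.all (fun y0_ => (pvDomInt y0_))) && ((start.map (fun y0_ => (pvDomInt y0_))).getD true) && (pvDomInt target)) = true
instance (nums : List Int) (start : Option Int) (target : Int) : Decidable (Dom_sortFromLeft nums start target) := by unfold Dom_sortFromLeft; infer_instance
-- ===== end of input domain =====

-- B replaces A's scan-and-swap loop by a closed-form count of the non-target elements of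
-- the suffix (objective: simpler). Equivalence is about the RETURN value only: Python A
-- swaps elements of nums in place, B leaves nums untouched.

-- ===== PORT A =====
-- inner loop: first j in [j, n) with nums[j] == target (A's `for j in range(i+1, len(nums))`)
def pvFindA (nums : List Int) (target : Int) (j n : Nat) : Option Nat :=
  if h : j < n then
    if nums.getD j 0 = target then some j
    else pvFindA nums target (j + 1) n
  else none
termination_by n - j

-- outer loop over i in [i, n); the swap `nums[i], nums[found] = nums[found], nums[i]`
def pvLoopA (nums : List Int) (target : Int) (i n : Nat) : Option Int :=
  if h : i < n then
    let cur := nums.getD i 0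
    if cur ≠ target then
      match pvFindA nums target (i + 1) n with
      | none => some (i : Int)
      | some found => pvLoopA ((nums.set i (nums.getD found 0)).set found cur) target (i + 1) n
    else pvLoopA nums target (i + 1) n
  else none
termination_by n - i

def sortFromLeft (nums : List Int) (start : Option Int) (target : Int) : Option Int :=
  match start with
  | none => none
  | some s => pvLoopA nums target s.toNat nums.length

-- ===== PORT B =====
def sortFromLeft_alt (nums : List Int) (start : Option Int) (target : Int) : Option Int :=
  match start with
  | none => none
  | some s =>
    let n : Int := nums.length
    if s ≥ n then none
    else
      let miss : Nat := (PySem.List.slice nums (some s) none).countP (fun x => x ≠ target)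
      if miss = 0 then none else some (n - (miss : Int))

-- ===== PRECONDITION & SPEC =====
-- Pre_ excludes a negative start index, which is outside the function's natural domain:
-- there A either raises IndexError (start < -len(nums)) or returns an accidental value
-- through Python's negative-index wraparound (e.g. the negative index -1 itself).
def Pre_sortFromLeft (nums : List Int) (start : Option Int) (target : Int) : Prop :=
  0 ≤ start.getD 0
instance (nums : List Int) (start : Option Int) (target : Int) : Decidable (Pre_sortFromLeft nums start target) := by unfold Pre_sortFromLeft; infer_instance
def pvWitness_sortFromLeft : List Int × Option Int × Int := ([1, 0, 2, 0], some 0, 0)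

-- On start = some s with s < -len(nums), A raises IndexError while B returns a value (the
-- same closed form, computed on Python's clamped slice nums[s:]).
def Raises_sortFromLeft (nums : List Int) (start : Option Int) (target : Int) : Prop :=
  start.isSome ∧ start.getD 0 < -(nums.length : Int)
instance (nums : List Int) (start : Option Int) (target : Int) : Decidable (Raises_sortFromLeft nums start target) := by unfold Raises_sortFromLeft; infer_instance
def pvRaiseWitness_sortFromLeft : List Int × Option Int × Int := ([], some (-1), 0)
def pvRaiseWitnessOut_sortFromLeft : Option Int := none

def Spec_sortFromLeft (nums : List Int) (start : Option Int) (target : Int) (out : Option Int) : Prop := out = sortFromLeft_alt nums start target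
instance (nums : List Int) (start : Option Int) (target : Int) (out : Option Int) : Decidable (Spec_sortFromLeft nums start target out) := by unfold Spec_sortFromLeft; infer_instance

-- ===== CLAIM (what is proved, stated in full; the proofs are below) =====
def Claim_equal_sortFromLeft : Prop := ∀ (nums : List Int) (start : Option Int) (target : Int), Dom_sortFromLeft nums start target → Pre_sortFromLeft nums start target → Spec_sortFromLeft nums start target (sortFromLeft nums start target)
def Claim_raises_sortFromLeft : Prop := (∀ (nums : List Int) (start : Option Int) (target : Int), Dom_sortFromLeft nums start target → Raises_sortFromLeft nums start target → ¬ Pre_sortFromLeft nums start target) ∧ (Dom_sortFromLeft (pvRaiseWitness_sortFromLeft.1) (pvRaiseWitness_sortFromLeft.2.1) (pvRaiseWitness_sortFromLeft.2.2) ∧ Raises_sortFromLeft (pvRaiseWitness_sortFromLeft.1) (pvRaiseWitness_sortFromLeft.2.1) (pvRaiseWitness_sortFromLeft.2.2) ∧ sortFromLeft_alt (pvRaiseWitness_sortFromLeft.1) (pvRaiseWitness_sortFromLeft.2.1) (pvRaiseWitness_sortFromLeft.2.2) = pvRaiseWitnessOut_sortFromLeft)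

-- ===== LEMMAS AND PROOFS =====

lemma pvFindA_none (nums : List Int) (target : Int) :
    ∀ (k j : Nat), nums.length - j ≤ k →
    pvFindA nums target j nums.length = none →
    (nums.drop j).countP (fun x => x = target) = 0 := by
  intro k
  induction k with
  | zero =>
    intro j hk _
    have : nums.drop j = [] := List.drop_eq_nil_of_le (by omega)
    simp [this]
  | succ k ih =>
    intro j hk hnone
    rw [pvFindA] at hnone
    by_cases h : j < nums.length
    · rw [dif_pos h] at hnone
      have hd : nums.drop j = nums[j] :: nums.drop (j + 1) := List.drop_eq_getElem_cons h
      by_cases he : nums.getD j 0 = target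
      · rw [if_pos he] at hnone; exact absurd hnone (by simp)
      · rw [if_neg he] at hnone
        have hne : ¬ (nums[j] = target) := by
          rwa [List.getD_eq_getElem _ _ h] at he
        have hrec := ih (j + 1) (by omega) hnone
        have hif : (decide (nums[j] = target)) = false := by simp [hne]
        rw [hd, List.countP_cons, hrec, hif]
        simp
    · have : nums.drop j = [] := List.drop_eq_nil_of_le (by omega)
      simp [this]

lemma pvFindA_some (nums : List Int) (target : Int) :
    ∀ (k j j' : Nat), nums.length - j ≤ k →
    pvFindA nums target j nums.length = some j' →
    j ≤ j' ∧ j' < nums.length ∧ nums.getD j' 0 = target := by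
  intro k
  induction k with
  | zero =>
    intro j j' hk hsome
    rw [pvFindA, dif_neg (by omega)] at hsome
    exact absurd hsome (by simp)
  | succ k ih =>
    intro j j' hk hsome
    rw [pvFindA] at hsome
    by_cases h : j < nums.length
    · rw [dif_pos h] at hsome
      by_cases he : nums.getD j 0 = target
      · rw [if_pos he] at hsome
        obtain rfl : j = j' := by simpa using hsome
        exact ⟨le_refl _, h, he⟩
      · rw [if_neg he] at hsome
        obtain ⟨h1, h2, h3⟩ := ih (j + 1) j' (by omega) hsome
        exact ⟨by omega, h2, h3⟩
    · rw [dif_neg h] at hsome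
      exact absurd hsome (by simp)

lemma pvLoopA_spec (target : Int) :
    ∀ (k : Nat) (nums : List Int) (i : Nat), nums.length - i ≤ k →
    pvLoopA nums target i nums.length =
      (if (nums.drop i).countP (fun x => x ≠ target) = 0 then none
       else some ((nums.length : Int) - ((nums.drop i).countP (fun x => x ≠ target) : Int))) := by
  intro k
  induction k with
  | zero =>
    intro nums i hk
    have hd : nums.drop i = [] := List.drop_eq_nil_of_le (by omega)
    rw [pvLoopA, dif_neg (by omega), hd]
    simp
  | succ k ih =>
    intro nums i hk
    rw [pvLoopA]
    by_cases h : i < nums.length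
    · rw [dif_pos h]
      have hd : nums.drop i = nums[i] :: nums.drop (i + 1) := List.drop_eq_getElem_cons h
      have hgd : nums.getD i 0 = nums[i] := List.getD_eq_getElem _ _ h
      by_cases hcur : nums.getD i 0 ≠ target
      · rw [if_pos hcur]
        have hcur' : ¬ (nums[i] = target) := by rwa [hgd] at hcur
        cases hfind : pvFindA nums target (i + 1) nums.length with
        | none =>
          refine Eq.trans (rfl : _ = some ((i : Nat) : Int)) ?_
          -- no target remains to the right: every element of drop (i+1) differs from target
          have h0 := pvFindA_none nums target (nums.length - (i + 1)) (i + 1) (le_refl _) hfind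
          have hall : ∀ x ∈ nums.drop (i + 1), x ≠ target := by
            intro x hx
            simpa using List.countP_eq_zero.mp h0 x hx
          have hcomp : (nums.drop (i + 1)).countP (fun x => x ≠ target) = (nums.drop (i + 1)).length :=
            List.countP_eq_length.mpr (by intro a ha; simpa using hall a ha)
          have hif : (decide (nums[i] ≠ target)) = true := by simp [hcur']
          have hcc : (nums.drop i).countP (fun x => x ≠ target)
              = (nums.drop (i + 1)).countP (fun x => x ≠ target) + 1 := by
            rw [hd, List.countP_cons, hif]
            simp
          have hlen2 : (nums.drop (i + 1)).length = nums.length - (i + 1) := List.length_drop ..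
          have hcNT : (nums.drop i).countP (fun x => x ≠ target) = nums.length - i := by
            omega
          rw [if_neg (by rw [hcNT]; omega)]
          rw [hcNT]
          congr 1
          omega
        | some found =>
          obtain ⟨hf1, hf2, hf3⟩ := pvFindA_some nums target (nums.length - (i + 1)) (i + 1) found (le_refl _) hfind
          set b := nums.getD found 0 with hb
          set nums' := (nums.set i b).set found (nums.getD i 0) with hnums'
          refine Eq.trans (rfl : _ = pvLoopA nums' target (i + 1) nums.length) ?_
          have hlen' : nums'.length = nums.length := by simp [hnums']
          have hdrop1 : (nums.set i b).drop (i + 1) = nums.drop (i + 1) := by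
            rw [List.drop_set, if_pos (by omega)]
          have hdrop' : nums'.drop (i + 1) = (nums.drop (i + 1)).set (found - (i + 1)) (nums.getD i 0) := by
            rw [hnums', List.drop_set, if_neg (by omega), hdrop1]
          have hidx : found - (i + 1) < (nums.drop (i + 1)).length := by
            rw [List.length_drop]; omega
          have helem : (nums.drop (i + 1))[found - (i + 1)] = target := by
            rw [List.getD_eq_getElem _ _ hf2] at hb
            rw [List.getElem_drop]
            have heq : i + 1 + (found - (i + 1)) = found := by omega
            simp only [heq]
            exact hb.symm.trans hf3
          have hcount : (nums'.drop (i + 1)).countP (fun x => x ≠ target)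
              = (nums.drop (i + 1)).countP (fun x => x ≠ target) + 1 := by
            have hif1 : (decide ((target : Int) ≠ target)) = false := by simp
            have hif2 : (decide (nums.getD i 0 ≠ target)) = true := by
              rw [hgd]; simp [hcur']
            rw [hdrop', List.countP_set hidx, helem, hif1, hif2]
            simp
          have hci : (nums.drop i).countP (fun x => x ≠ target)
              = (nums.drop (i + 1)).countP (fun x => x ≠ target) + 1 := by
            have hif : (decide (nums[i] ≠ target)) = true := by simp [hcur']
            rw [hd, List.countP_cons, hif]
            simp
          have := ih nums' (i + 1) (by omega)
          rw [hlen'] at this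
          rw [this, hcount, hci]
      · rw [if_neg hcur]
        have hcur' : nums[i] = target := by
          have := not_not.mp hcur
          rwa [hgd] at this
        have hci : (nums.drop i).countP (fun x => x ≠ target)
            = (nums.drop (i + 1)).countP (fun x => x ≠ target) := by
          have hif : (decide (nums[i] ≠ target)) = false := by simp [hcur']
          rw [hd, List.countP_cons, hif]
          simp
        rw [ih nums (i + 1) (by omega), hci]
    · rw [dif_neg h]
      have hd : nums.drop i = [] := List.drop_eq_nil_of_le (by omega)
      simp [hd]

-- ===== VERDICT (by name: the statement is the Claim_ definition above) =====
theorem sortFromLeft_spec : Claim_equal_sortFromLeft := by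
  intro nums start target _ hpre
  unfold Spec_sortFromLeft sortFromLeft sortFromLeft_alt
  cases start with
  | none => rfl
  | some s =>
    have hs0 : 0 ≤ s := by simpa using hpre
    have hcast : ((s.toNat : Int)) = s := Int.toNat_of_nonneg hs0
    show pvLoopA nums target s.toNat nums.length =
      (if s ≥ (nums.length : Int) then none
       else if ((PySem.List.slice nums (some s) none).countP (fun x => x ≠ target)) = 0 then none
       else some ((nums.length : Int) - (((PySem.List.slice nums (some s) none).countP (fun x => x ≠ target) : Nat) : Int)))
    rw [pvLoopA_spec target (nums.length - s.toNat) nums s.toNat (le_refl _)]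
    rw [← hcast, PySem.List.slice_from_natCast]
    simp only [Int.toNat_natCast]
    by_cases hge : ((s.toNat : Int) ≥ (nums.length : Int))
    · have hdp : nums.drop s.toNat = [] := List.drop_eq_nil_of_le (by exact_mod_cast hge)
      rw [if_pos hge, hdp]
      simp
    · rw [if_neg hge]

@[simp] theorem sortFromLeft_raises : Claim_raises_sortFromLeft := by
  unfold Claim_raises_sortFromLeft
  constructor
  · intro nums start target _ hr
    unfold Raises_sortFromLeft at hr
    unfold Pre_sortFromLeft
    omega
  · decide
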